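-- pv_equiv track=rewrite | github.com/adithyan001/final_year_project | python/vadf.py | vadf_enc
-- ===== SOURCE A (Python) =====
-- def d2b(n, r):
--     binary = bin(n)[2:].zfill(r) #decimal to r-bit binary
--     return binary
--
-- def vadf_enc(num):
--     if (num <= 1):
--         return ("0000000000000000")
--     else:
--         bnum = d2b(num, 32)
--         for i in range(len(bnum)):
--             if bnum[i] == '1':
--                 loc = 31 - i #finding the position of location bit
--                 break
--         bloc = d2b(loc, 5)
--         #finding the data bits
--         if (loc < 6):
--             data_bits = bnum[-loc:]
--             while len(data_bits) < 6:
--                 data_bits = '0' + data_bits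
--         elif (loc == 6):
--             data_bits = bnum[32 - loc: 38 - loc]
--         else:
--             data_bits = bnum[32 - loc: 37 - loc]
--             if (bnum[38 - loc] == '1'):
--                 data_bits = data_bits + '1'
--             else:
--                 data_bits = data_bits + bnum[37 - loc]
--         #finding the parity bit
--         count_ones = data_bits.count('1')
--         if (count_ones % 2 == 0):
--             parity_bit = '0'
--         else:
--             parity_bit = '1'
--         #finding the error correction bits
--         int_loc = [int(bit) for bit in bloc[::-1]]
--         error_correction_bits = [0] * 4
--         error_correction_bits[3] = int_loc[4] ^ int_loc[2] ^ int_loc[1]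
--         error_correction_bits[2] = int_loc[4] ^ int_loc[3] ^ int_loc[1]
--         error_correction_bits[1] = int_loc[4] ^ int_loc[3] ^ int_loc[2]
--         error_correction_bits[0] = int_loc[0]
--
--         temp = ''.join(map(str, error_correction_bits))
--         ecb = temp[::-1]
--
--         out16 = parity_bit + bloc + ecb + data_bits #16 bit vadf encoded output
--         return out16
-- ===== SOURCE B (Python) =====
-- def vadf_enc(num):
--     if num <= 1:
--         return "0000000000000000"
--     loc = num.bit_length() - 1
--     if loc < 6:
--         data = num & ((1 << loc) - 1)
--     elif loc == 6:
--         data = num & 63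
--     else:
--         data = (((num >> (loc - 5)) & 31) << 1) | (((num >> (loc - 6)) | (num >> (loc - 7))) & 1)
--     l = [(loc >> i) & 1 for i in range(5)]
--     d = [(data >> i) & 1 for i in range(6)]
--     parity = d[0] ^ d[1] ^ d[2] ^ d[3] ^ d[4] ^ d[5]
--     bits = [parity, l[4], l[3], l[2], l[1], l[0],
--             l[4] ^ l[2] ^ l[1], l[4] ^ l[3] ^ l[1], l[4] ^ l[3] ^ l[2], l[0],
--             d[5], d[4], d[3], d[2], d[1], d[0]]
--     return ''.join('1' if b else '0' for b in bits)
-- ===== Notes on version B (the rewrite author's own statement) =====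
-- stated objective: idiomatic
-- what changed: B replaces A's construction and scanning/slicing of a zero-filled binary string by direct integer bit arithmetic (bit_length, shifts, masks) and assembles the sixteen output bits in one list join.
import Mathlib
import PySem

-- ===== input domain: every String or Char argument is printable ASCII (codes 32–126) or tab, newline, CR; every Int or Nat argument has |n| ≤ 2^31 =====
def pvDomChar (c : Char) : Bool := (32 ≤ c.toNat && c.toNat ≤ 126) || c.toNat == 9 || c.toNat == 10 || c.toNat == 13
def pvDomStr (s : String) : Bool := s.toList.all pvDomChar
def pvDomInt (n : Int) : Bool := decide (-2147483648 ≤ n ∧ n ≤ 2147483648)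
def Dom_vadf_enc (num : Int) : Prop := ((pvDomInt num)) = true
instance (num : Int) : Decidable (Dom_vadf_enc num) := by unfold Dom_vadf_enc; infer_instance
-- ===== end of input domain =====

-- B replaces A's binary-string scanning/slicing by direct bit arithmetic
-- (bit_length, shifts and masks) and assembles the sixteen output bits in one list; objective: idiomatic.

-- ===== PORT A =====

-- bin(n)[2:] for n ≥ 0 (every call in A passes a nonnegative int); strings are carried as List Char (PySem style)
def pyBinNat (n : Nat) : List Char :=
  if _h : n < 2 then [if n = 1 then '1' else '0']
  else pyBinNat (n / 2) ++ [if n % 2 = 1 then '1' else '0']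
  decreasing_by exact Nat.div_lt_self (by omega) (by omega)

-- str.zfill(r)
def pyZfill (s : List Char) (r : Nat) : List Char := List.replicate (r - s.length) '0' ++ s

-- helper d2b(n, r) of the module
def d2b (n : Nat) (r : Nat) : List Char := pyZfill (pyBinNat n) r

-- the 'for i in range(len(bnum)): if bnum[i] == '1': loc = 31 - i; break' loop;
-- none = loop ends without break (Python: NameError on 'loc'; unreachable for num ≥ 2 in Dom)
def findLoc : List Char → Nat → Option Nat
  | [], _ => none
  | c :: rest, i => if c = '1' then some (31 - i) else findLoc rest (i + 1)

-- the 'while len(data_bits) < 6: data_bits = '0' + data_bits' loop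
def pad6 (s : List Char) : List Char :=
  if _h : s.length < 6 then pad6 ('0' :: s) else s
  decreasing_by simp; omega

def vadf_enc (num : Int) : String :=
  if num ≤ 1 then "0000000000000000"
  else
    let bnum := d2b num.toNat 32        -- num ≥ 2 here, so bin(num) = pyBinNat num.toNat
    match findLoc bnum 0 with
    | none => ""                         -- unreachable in Dom (Python would raise NameError)
    | some loc =>
      let bloc := d2b loc 5
      let data_bits :=
        if loc < 6 then
          pad6 (PySem.List.slice bnum (some (-(loc : Int))) none)
        else if loc = 6 then
          PySem.List.slice bnum (some ((32 - loc : Nat) : Int)) (some ((38 - loc : Nat) : Int))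
        else
          let db := PySem.List.slice bnum (some ((32 - loc : Nat) : Int)) (some ((37 - loc : Nat) : Int))
          -- bnum[38-loc] / bnum[37-loc]: indices are in range for every input in Dom, so getD's default is never used
          if PySem.List.pyGetD bnum ((38 - loc : Nat) : Int) '0' = '1' then db ++ ['1']
          else db ++ [PySem.List.pyGetD bnum ((37 - loc : Nat) : Int) '0']
      let count_ones := PySem.List.count data_bits '1'
      let parity_bit : Char := if count_ones % 2 = 0 then '0' else '1'
      -- int(bit) for bit in bloc[::-1]; bloc consists only of '0'/'1'
      let int_loc : List Int := bloc.reverse.map (fun c => if c = '1' then 1 else 0)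
      let il := fun (i : Nat) => PySem.List.pyGetD int_loc (i : Int) 0
      let e3 := PySem.Int.bxor (PySem.Int.bxor (il 4) (il 2)) (il 1)
      let e2 := PySem.Int.bxor (PySem.Int.bxor (il 4) (il 3)) (il 1)
      let e1 := PySem.Int.bxor (PySem.Int.bxor (il 4) (il 3)) (il 2)
      let e0 := il 0
      let temp := ([e0, e1, e2, e3].map (fun b => PySem.Int.toChars b)).flatten  -- ''.join(map(str, …))
      let ecb := temp.reverse
      String.mk (parity_bit :: (bloc ++ ecb ++ data_bits))

-- ===== PORT B =====
def vadf_enc_alt (num : Int) : String :=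
  if num ≤ 1 then "0000000000000000"
  else
    let n := num.toNat                   -- num ≥ 2 here; Python int arithmetic on nonneg values = Nat arithmetic
    let loc := PySem.Int.bitLength num - 1
    let data : Nat :=
      if loc < 6 then n &&& ((1 <<< loc) - 1)
      else if loc = 6 then n &&& 63
      else (((n >>> (loc - 5)) &&& 31) <<< 1) ||| (((n >>> (loc - 6)) ||| (n >>> (loc - 7))) &&& 1)
    let l := (List.range 5).map (fun i => (loc >>> i) &&& 1)
    let d := (List.range 6).map (fun i => (data >>> i) &&& 1)
    let li := fun (i : Nat) => l.getD i 0
    let di := fun (i : Nat) => d.getD i 0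
    let parity := di 0 ^^^ di 1 ^^^ di 2 ^^^ di 3 ^^^ di 4 ^^^ di 5
    let bits := [parity, li 4, li 3, li 2, li 1, li 0,
                 li 4 ^^^ li 2 ^^^ li 1, li 4 ^^^ li 3 ^^^ li 1, li 4 ^^^ li 3 ^^^ li 2, li 0,
                 di 5, di 4, di 3, di 2, di 1, di 0]
    String.mk (bits.map (fun b => if b ≠ 0 then '1' else '0'))

-- ===== PRECONDITION & SPEC =====
def Spec_vadf_enc (num : Int) (out : String) : Prop := out = vadf_enc_alt num
instance (num : Int) (out : String) : Decidable (Spec_vadf_enc num out) := by unfold Spec_vadf_enc; infer_instance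

-- ===== CLAIM (what is proved, stated in full; the proofs are below) =====
def Claim_equal_vadf_enc : Prop := ∀ (num : Int), Dom_vadf_enc num → Spec_vadf_enc num (vadf_enc num)

-- ===== LEMMAS AND PROOFS =====

-- the big-endian w-bit rendering of n
def bitChar (n i : Nat) : Char := if n.testBit i then '1' else '0'
def bitsBE (w n : Nat) : List Char := (List.range w).reverse.map (bitChar n)

theorem bitsBE_succ (w n : Nat) : bitsBE (w + 1) n = bitChar n w :: bitsBE w n := by
  simp [bitsBE, List.range_succ]

theorem bitsBE_shift : ∀ (k n : Nat), bitsBE (k + 1) n = bitsBE k (n / 2) ++ [bitChar n 0] := by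
  intro k
  induction k with
  | zero => intro n; simp [bitsBE]
  | succ k ih =>
    intro n
    rw [bitsBE_succ, ih n, bitsBE_succ]
    have : bitChar (n / 2) k = bitChar n (k + 1) := by
      simp [bitChar, Nat.testBit_div_two]
    simp [this]

theorem pyBinNat_eq : ∀ n, 1 ≤ n → pyBinNat n = bitsBE (Nat.log2 n + 1) n := by
  intro n
  induction n using Nat.strong_induction_on with
  | _ n ih =>
    intro h1
    by_cases h2 : n < 2
    · have hn1 : n = 1 := by omega
      subst hn1
      rw [pyBinNat, dif_pos (by omega)]
      have hlog : Nat.log2 1 = 0 := by simpa using Nat.log2_two_pow (n := 0)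
      rw [hlog]
      simp [bitsBE, bitChar]
    · rw [pyBinNat, dif_neg h2]
      have hsh : n >>> 1 = n / 2 := by
        rw [Nat.shiftRight_eq_div_pow]
      have hlog : Nat.log2 n = Nat.log2 (n / 2) + 1 := by
        rw [Nat.log2_eq_succ_log2_shiftRight (by rw [hsh]; omega), hsh]
      have hc : (if n % 2 = 1 then '1' else '0') = bitChar n 0 := by
        rcases Nat.mod_two_eq_zero_or_one n with h | h <;>
          simp [bitChar, Nat.testBit_zero, h]
      have hih : pyBinNat (n / 2) = bitsBE (Nat.log2 (n / 2) + 1) (n / 2) :=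
        ih (n / 2) (Nat.div_lt_self (by omega) (by omega)) (by omega)
      rw [hih, hlog, hc, bitsBE_shift (Nat.log2 (n / 2) + 1) n]

theorem bitsBE_congr (w : Nat) {m n : Nat} (h : ∀ i, i < w → m.testBit i = n.testBit i) :
    bitsBE w m = bitsBE w n := by
  induction w with
  | zero => rfl
  | succ w ih =>
    rw [bitsBE_succ, bitsBE_succ, ih (fun i hi => h i (by omega))]
    simp [bitChar, h w (by omega)]

theorem zeros_prepend : ∀ (w k n : Nat), k ≤ w → n < 2 ^ k →
    List.replicate (w - k) '0' ++ bitsBE k n = bitsBE w n := by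
  intro w
  induction w with
  | zero => intro k n hk _; interval_cases k; simp [bitsBE]
  | succ w ih =>
    intro k n hk hn
    by_cases he : k = w + 1
    · subst he; simp
    · have hk' : k ≤ w := by omega
      have h1 : w + 1 - k = (w - k) + 1 := by omega
      rw [h1, List.replicate_succ, bitsBE_succ]
      have hb : bitChar n w = '0' := by
        simp [bitChar, Nat.testBit_eq_false_of_lt
          (lt_of_lt_of_le hn (Nat.pow_le_pow_right (by omega) hk'))]
      rw [hb, List.cons_append, ih k n hk' hn]

theorem d2b_eq (n w : Nat) (h1 : 1 ≤ n) (h2 : n < 2 ^ w) : d2b n w = bitsBE w n := by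
  have hk : Nat.log2 n + 1 ≤ w := by
    by_contra hc
    have hw : w ≤ Nat.log2 n := by omega
    exact absurd (lt_of_le_of_lt (Nat.pow_le_pow_right (by omega) hw)
      (lt_of_le_of_lt (Nat.log2_self_le (by omega)) h2)) (lt_irrefl _)
  rw [d2b, pyZfill, pyBinNat_eq n h1]
  have hlen : (bitsBE (Nat.log2 n + 1) n).length = Nat.log2 n + 1 := by
    simp [bitsBE]
  rw [hlen]
  exact zeros_prepend w (Nat.log2 n + 1) n hk Nat.lt_log2_self

theorem testBit_log2' (n : Nat) (h : 1 ≤ n) : n.testBit (Nat.log2 n) = true := by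
  have h1 : 2 ^ Nat.log2 n ≤ n := Nat.log2_self_le (by omega)
  have h2 : n < 2 ^ (Nat.log2 n + 1) := Nat.lt_log2_self
  have h2' : n < 2 * 2 ^ Nat.log2 n := by rw [pow_succ] at h2; omega
  have hd : n / 2 ^ Nat.log2 n = 1 := Nat.div_eq_of_lt_le (by omega) (by omega)
  rw [Nat.testBit_eq_decide_div_mod_eq, hd]
  decide

theorem findLoc_zeros : ∀ (j : Nat) (s : List Char) (i : Nat),
    findLoc (List.replicate j '0' ++ '1' :: s) i = some (31 - (i + j)) := by
  intro j
  induction j with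
  | zero => intro s i; simp [findLoc]
  | succ j ih =>
    intro s i
    rw [List.replicate_succ, List.cons_append, findLoc]
    simp only [if_neg (by decide : ¬ ('0' : Char) = '1')]
    rw [ih s (i + 1)]
    congr 1
    omega

theorem findLoc_bitsBE (n : Nat) (h1 : 1 ≤ n) (h2 : n < 2 ^ 32) :
    findLoc (bitsBE 32 n) 0 = some (Nat.log2 n) := by
  have hk : Nat.log2 n + 1 ≤ 32 := by
    by_contra hc
    have hw : 32 ≤ Nat.log2 n := by omega
    exact absurd (lt_of_le_of_lt (Nat.pow_le_pow_right (by omega) hw)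
      (lt_of_le_of_lt (Nat.log2_self_le (by omega)) h2)) (lt_irrefl _)
  rw [← zeros_prepend 32 (Nat.log2 n + 1) n hk Nat.lt_log2_self, bitsBE_succ]
  have hb : bitChar n (Nat.log2 n) = '1' := by simp [bitChar, testBit_log2' n h1]
  rw [hb, findLoc_zeros]
  all_goals simp only [Option.some.injEq]
  all_goals omega

theorem bitsBE_length (w n : Nat) : (bitsBE w n).length = w := by simp [bitsBE]

theorem bitsBE_getElem (w n j : Nat) (h : j < w) :
    (bitsBE w n)[j]'(by simp [bitsBE_length, h]) = bitChar n (w - 1 - j) := by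
  simp [bitsBE]
  all_goals try congr 1
  all_goals try rw [List.getElem_reverse]
  all_goals try simp
  all_goals try omega

theorem bitsBE_drop (w n a : Nat) (h : a ≤ w) : (bitsBE w n).drop a = bitsBE (w - a) n := by
  apply List.ext_getElem
  · simp [bitsBE_length]
  · intro j hj1 hj2
    have hjb : j < w - a := by simpa [bitsBE_length] using hj2
    rw [List.getElem_drop, bitsBE_getElem w n (a + j) (by omega), bitsBE_getElem (w - a) n j hjb]
    have he : w - 1 - (a + j) = w - a - 1 - j := by omega
    rw [he]

theorem bitsBE_take (w n b : Nat) (h : b ≤ w) :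
    (bitsBE w n).take b = bitsBE b (n >>> (w - b)) := by
  apply List.ext_getElem
  · simp [bitsBE_length, h]
  · intro j hj1 hj2
    have hjb : j < b := by simpa [bitsBE_length] using hj2
    rw [List.getElem_take, bitsBE_getElem w n j (by omega), bitsBE_getElem b _ j hjb]
    simp only [bitChar, Nat.testBit_shiftRight]
    have he : w - b + (b - 1 - j) = w - 1 - j := by omega
    rw [he]

theorem pyGetD_bitsBE (w n k : Nat) (hk : k < w) :
    PySem.List.pyGetD (bitsBE w n) ((k : Nat) : Int) '0' = bitChar n (w - 1 - k) := by
  rw [PySem.List.pyGetD_natCast, List.getD_eq_getElem?_getD,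
    List.getElem?_eq_getElem (by rw [bitsBE_length]; exact hk)]
  simp [bitsBE_getElem w n k hk]

theorem slice_bitsBE (n a b : Nat) (ha : a ≤ b) (hb : b ≤ 32) :
    PySem.List.slice (bitsBE 32 n) (some ((a : Nat) : Int)) (some ((b : Nat) : Int))
      = bitsBE (b - a) (n >>> (32 - b)) := by
  rw [PySem.List.slice_natCast, bitsBE_drop 32 n a (by omega),
    bitsBE_take (32 - a) n (b - a) (by omega)]
  have he : 32 - a - (b - a) = 32 - b := by omega
  rw [he]

-- proof-only helpers: the common shape of the two tails
def dataOf (n L : Nat) : Nat :=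
  if L < 6 then n &&& ((1 <<< L) - 1)
  else if L = 6 then n &&& 63
  else (((n >>> (L - 5)) &&& 31) <<< 1) ||| (((n >>> (L - 6)) ||| (n >>> (L - 7))) &&& 1)

def tailA (L D : Nat) : String :=
  let bloc := bitsBE 5 L
  let data_bits := bitsBE 6 D
  let count_ones := PySem.List.count data_bits '1'
  let parity_bit : Char := if count_ones % 2 = 0 then '0' else '1'
  let int_loc : List Int := bloc.reverse.map (fun c => if c = '1' then 1 else 0)
  let il := fun (i : Nat) => PySem.List.pyGetD int_loc (i : Int) 0
  let e3 := PySem.Int.bxor (PySem.Int.bxor (il 4) (il 2)) (il 1)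
  let e2 := PySem.Int.bxor (PySem.Int.bxor (il 4) (il 3)) (il 1)
  let e1 := PySem.Int.bxor (PySem.Int.bxor (il 4) (il 3)) (il 2)
  let e0 := il 0
  let temp := ([e0, e1, e2, e3].map (fun b => PySem.Int.toChars b)).flatten
  let ecb := temp.reverse
  String.mk (parity_bit :: (bloc ++ ecb ++ data_bits))

def tailB (L D : Nat) : String :=
  let l := (List.range 5).map (fun i => (L >>> i) &&& 1)
  let d := (List.range 6).map (fun i => (D >>> i) &&& 1)
  let li := fun (i : Nat) => l.getD i 0
  let di := fun (i : Nat) => d.getD i 0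
  let parity := di 0 ^^^ di 1 ^^^ di 2 ^^^ di 3 ^^^ di 4 ^^^ di 5
  let bits := [parity, li 4, li 3, li 2, li 1, li 0,
               li 4 ^^^ li 2 ^^^ li 1, li 4 ^^^ li 3 ^^^ li 1, li 4 ^^^ li 3 ^^^ li 2, li 0,
               di 5, di 4, di 3, di 2, di 1, di 0]
  String.mk (bits.map (fun b => if b ≠ 0 then '1' else '0'))

-- the tails agree for every 5-bit location and 6-bit data value: fully decidable
set_option maxHeartbeats 4000000 in
theorem assemble_eq : ∀ L : Nat, L < 32 → ∀ D : Nat, D < 64 → tailA L D = tailB L D := by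
  decide

theorem pad6_eq_aux : ∀ (k : Nat) (s : List Char), 6 - s.length = k →
    pad6 s = List.replicate (6 - s.length) '0' ++ s := by
  intro k
  induction k with
  | zero =>
    intro s h
    rw [pad6, dif_neg (by omega), h]
    simp
  | succ k ih =>
    intro s h
    rw [pad6, dif_pos (by omega), ih ('0' :: s) (by simp; omega)]
    have h1 : 6 - s.length = (6 - ('0' :: s).length) + 1 := by simp; omega
    rw [h1, List.replicate_succ']
    simp

theorem pad6_eq (s : List Char) : pad6 s = List.replicate (6 - s.length) '0' ++ s :=
  pad6_eq_aux (6 - s.length) s rfl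

-- the sixth data bit in the loc > 6 branch
theorem data_bits_high (n L : Nat) (h7 : 7 ≤ L) :
    bitsBE 5 (n >>> (L - 5)) ++ [if n.testBit (L - 7) then '1' else bitChar n (L - 6)]
      = bitsBE 6 ((((n >>> (L - 5)) &&& 31) <<< 1) |||
          (((n >>> (L - 6)) ||| (n >>> (L - 7))) &&& 1)) := by
  have hbitD : ∀ k, k < 5 →
      (((((n >>> (L - 5)) &&& 31) <<< 1) |||
        (((n >>> (L - 6)) ||| (n >>> (L - 7))) &&& 1)).testBit (k + 1))
        = (n >>> (L - 5)).testBit k := by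
    intro k hk
    rw [Nat.testBit_or, Nat.testBit_shiftLeft]
    have e1 : ((n >>> (L - 5)) &&& 31).testBit k = (n >>> (L - 5)).testBit k := by
      rw [Nat.testBit_land]
      have h31 : Nat.testBit 31 k = true := by interval_cases k <;> decide
      simp [h31]
    have e2 : (((n >>> (L - 6)) ||| (n >>> (L - 7))) % 2).testBit (k + 1) = false := by
      have := Nat.testBit_mod_two_pow ((n >>> (L - 6)) ||| (n >>> (L - 7))) 1 (k + 1)
      simpa using this
    simp [e1, e2, Nat.add_sub_cancel, show k + 1 ≥ 1 by omega]
  have hbit0 :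
      (((((n >>> (L - 5)) &&& 31) <<< 1) |||
        (((n >>> (L - 6)) ||| (n >>> (L - 7))) &&& 1)).testBit 0)
        = (n.testBit (L - 6) || n.testBit (L - 7)) := by
    rw [Nat.testBit_or, Nat.testBit_shiftLeft]
    simp [Nat.testBit_land, Nat.testBit_one_zero, Nat.testBit_or, Nat.testBit_shiftRight]
  apply List.ext_getElem
  · simp [bitsBE_length]
  · intro j hj1 hj2
    have hj6 : j < 6 := by simpa [bitsBE_length] using hj2
    rw [bitsBE_getElem 6 _ j hj6]
    by_cases hj5 : j < 5
    · rw [List.getElem_append_left (by simpa [bitsBE_length] using hj5),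
        bitsBE_getElem 5 _ j hj5]
      have he : (6 : Nat) - 1 - j = (5 - 1 - j) + 1 := by omega
      rw [he]
      unfold bitChar
      rw [hbitD (5 - 1 - j) (by omega)]
    · have hj5' : j = 5 := by omega
      subst hj5'
      rw [List.getElem_append_right (by simp [bitsBE_length])]
      have he : (6 : Nat) - 1 - 5 = 0 := by norm_num
      rw [he]
      unfold bitChar
      rw [hbit0]
      simp [bitsBE_length, Nat.testBit_shiftRight]
      cases hx : n.testBit (L - 7) <;> cases hy : n.testBit (L - 6) <;> simp [hx, hy]

theorem dataOf_lt (n L : Nat) (h1 : 1 ≤ L) : dataOf n L < 64 := by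
  unfold dataOf
  split_ifs with hc1 hc2
  · have h2 : n &&& (1 <<< L - 1) ≤ 1 <<< L - 1 := Nat.and_le_right
    have h3 : (1 : Nat) <<< L = 2 ^ L := Nat.one_shiftLeft L
    have h4 : (2 : Nat) ^ L ≤ 2 ^ 5 := Nat.pow_le_pow_right (by omega) (by omega)
    norm_num at h4
    omega
  · have : n &&& 63 ≤ 63 := Nat.and_le_right
    omega
  · have h2 : (n >>> (L - 5)) &&& 31 ≤ 31 := Nat.and_le_right
    have h3 : ((n >>> (L - 5)) &&& 31) <<< 1 < 64 := by
      rw [Nat.shiftLeft_eq]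
      omega
    have h4 : ((n >>> (L - 6)) ||| (n >>> (L - 7))) &&& 1 < 64 := by
      have : ((n >>> (L - 6)) ||| (n >>> (L - 7))) &&& 1 ≤ 1 := Nat.and_le_right
      omega
    exact Nat.or_lt_two_pow (n := 6) h3 h4

theorem log2_bounds (n : Nat) (h2 : 2 ≤ n) (hlt : n < 2 ^ 32) :
    1 ≤ Nat.log2 n ∧ Nat.log2 n ≤ 31 := by
  constructor
  · exact (Nat.le_log2 (by omega)).2 (by simpa using h2)
  · have := (Nat.log2_lt (n := n) (by omega)).2 hlt
    omega

theorem bitLength_eq_log2 (num : Int) (h2 : 2 ≤ num) :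
    PySem.Int.bitLength num - 1 = Nat.log2 num.toNat := by
  have hne : num ≠ 0 := by omega
  have ha := PySem.Int.two_pow_bitLength_le num hne
  have hb := PySem.Int.lt_two_pow_bitLength num
  have hna : num.natAbs = num.toNat := by omega
  rw [hna] at ha hb
  have hb1 : 1 ≤ PySem.Int.bitLength num := by
    rcases Nat.eq_zero_or_pos (PySem.Int.bitLength num) with h | h
    · rw [h] at hb; norm_num at hb; omega
    · omega
  apply le_antisymm
  · exact (Nat.le_log2 (by omega)).2 ha
  · have := (Nat.log2_lt (n := num.toNat) (by omega)).2 hb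
    omega

theorem B_eval (num : Int) (h2 : 2 ≤ num) :
    vadf_enc_alt num = tailB (Nat.log2 num.toNat) (dataOf num.toNat (Nat.log2 num.toNat)) := by
  unfold vadf_enc_alt tailB dataOf
  rw [if_neg (by omega), bitLength_eq_log2 num h2]

theorem A_eval (num : Int) (h2 : 2 ≤ num) (hle : num ≤ 2147483648) :
    vadf_enc num = tailA (Nat.log2 num.toNat) (dataOf num.toNat (Nat.log2 num.toNat)) := by
  have hn2 : 2 ≤ num.toNat := by omega
  have hnlt : num.toNat < 2 ^ 32 := by norm_num; omega
  obtain ⟨hL1, hL31⟩ := log2_bounds num.toNat hn2 hnlt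
  unfold vadf_enc
  rw [if_neg (by omega)]
  have hbb : d2b num.toNat 32 = bitsBE 32 num.toNat := d2b_eq num.toNat 32 (by omega) hnlt
  simp only [hbb, findLoc_bitsBE num.toNat (by omega) hnlt]
  set n := num.toNat with hndef
  set L := Nat.log2 n with hLdef
  have hbloc : d2b L 5 = bitsBE 5 L := d2b_eq L 5 hL1 (by norm_num; omega)
  by_cases h6 : L < 6
  · -- loc < 6
    rw [if_pos h6, PySem.List.slice_from_neg_natCast _ L hL1, bitsBE_length,
      bitsBE_drop 32 n (32 - L) (by omega), pad6_eq, bitsBE_length]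
    have hLL : 32 - (32 - L) = L := by omega
    rw [hLL]
    have hcong : bitsBE L n = bitsBE L (n &&& (1 <<< L - 1)) := by
      apply bitsBE_congr
      intro i hi
      simp [Nat.testBit_land, Nat.one_shiftLeft, Nat.testBit_two_pow_sub_one, hi]
    have hlt : n &&& (1 <<< L - 1) < 2 ^ L := by
      have hx : n &&& (1 <<< L - 1) ≤ 1 <<< L - 1 := Nat.and_le_right
      have h3 : (1 : Nat) <<< L = 2 ^ L := Nat.one_shiftLeft L
      have h4 : (0 : Nat) < 2 ^ L := pow_pos (by norm_num) L
      omega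
    rw [hcong, zeros_prepend 6 L (n &&& (1 <<< L - 1)) (by omega) hlt, hbloc]
    unfold tailA dataOf
    rw [if_pos h6]
  · by_cases h6' : L = 6
    · -- loc = 6
      rw [if_neg h6, if_pos h6']
      rw [slice_bitsBE n (32 - L) (38 - L) (by omega) (by omega)]
      have e1 : 38 - L - (32 - L) = 6 := by omega
      have e2 : 32 - (38 - L) = 0 := by omega
      rw [e1, e2, Nat.shiftRight_zero]
      have hcong : bitsBE 6 n = bitsBE 6 (n &&& 63) := by
        apply bitsBE_congr
        intro i hi
        rw [Nat.testBit_land]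
        have h63 : Nat.testBit 63 i = true := by interval_cases i <;> decide
        simp [h63]
      rw [hcong, hbloc]
      unfold tailA dataOf
      rw [if_neg h6, if_pos h6']
    · -- loc > 6
      have h7 : 7 ≤ L := by omega
      rw [if_neg h6, if_neg h6']
      rw [slice_bitsBE n (32 - L) (37 - L) (by omega) (by omega)]
      have e1 : 37 - L - (32 - L) = 5 := by omega
      have e2 : 32 - (37 - L) = L - 5 := by omega
      rw [e1, e2]
      rw [pyGetD_bitsBE 32 n (38 - L) (by omega), pyGetD_bitsBE 32 n (37 - L) (by omega)]
      have e3 : 31 - (38 - L) = L - 7 := by omega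
      have e4 : 31 - (37 - L) = L - 6 := by omega
      rw [e3, e4, hbloc]
      have hif : (if bitChar n (L - 7) = '1'
            then bitsBE 5 (n >>> (L - 5)) ++ ['1']
            else bitsBE 5 (n >>> (L - 5)) ++ [bitChar n (L - 6)])
          = bitsBE 5 (n >>> (L - 5)) ++
              [if n.testBit (L - 7) then '1' else bitChar n (L - 6)] := by
        cases hbit : n.testBit (L - 7) <;> simp [bitChar, hbit]
      rw [hif, data_bits_high n L h7]
      unfold tailA dataOf
      rw [if_neg h6, if_neg h6']

-- ===== VERDICT (by name: the statement is the Claim_ definition above) =====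
theorem vadf_enc_spec : Claim_equal_vadf_enc := by
  intro num hdom
  unfold Spec_vadf_enc
  by_cases hle : num ≤ 1
  · unfold vadf_enc vadf_enc_alt
    rw [if_pos hle, if_pos hle]
  · have h2 : 2 ≤ num := by omega
    have hdom' : num ≤ 2147483648 := by
      unfold Dom_vadf_enc pvDomInt at hdom
      simp at hdom
      omega
    rw [A_eval num h2 hdom', B_eval num h2]
    have hn2 : 2 ≤ num.toNat := by omega
    have hnlt : num.toNat < 2 ^ 32 := by norm_num; omega
    obtain ⟨hL1, hL31⟩ := log2_bounds num.toNat hn2 hnlt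
    exact assemble_eq _ (by omega) _ (dataOf_lt num.toNat _ hL1)
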